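-- pv_equiv track=rewrite | github.com/cejiofor/poker_term_project | handEval.py | isRoyal
-- ===== SOURCE A (Python) =====
-- def isRoyal(faces):
--     #Determins if a hand is royal if all the faces in the hand are in the
--     #possible Royal Faces
--     royalFaces = "TJQKA"
--     count = 0
--     for char in royalFaces:
--         if char in faces:
--             count += 1
--         else:
--             count -= 1
--     return count == len(faces)
-- ===== SOURCE B (Python) =====
-- def isRoyal(faces):
--     # Simpler characterization: A's counter test succeeds exactly when the hand
--     # has length 5 and contains every royal face.
--     return len(faces) == 5 and all(c in faces for c in "TJQKA")
-- ===== Notes on version B (the rewrite author's own statement) =====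
-- stated objective: simpler
-- what changed: Replaced the +1/-1 counter loop compared against len(faces) by its closed-form meaning: len(faces) == 5 and all five royal faces present (proved equivalent since k distinct present faces force length >= k).
import Mathlib
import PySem

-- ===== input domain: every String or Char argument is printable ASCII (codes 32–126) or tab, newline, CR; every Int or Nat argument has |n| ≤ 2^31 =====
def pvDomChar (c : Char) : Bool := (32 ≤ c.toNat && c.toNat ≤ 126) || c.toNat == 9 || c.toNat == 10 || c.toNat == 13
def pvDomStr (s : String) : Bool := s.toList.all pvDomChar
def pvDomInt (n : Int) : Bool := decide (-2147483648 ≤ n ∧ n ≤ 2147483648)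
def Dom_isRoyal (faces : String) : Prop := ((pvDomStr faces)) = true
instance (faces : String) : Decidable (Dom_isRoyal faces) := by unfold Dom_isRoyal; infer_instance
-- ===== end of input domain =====

-- B replaces A's +1/-1 counter loop (compared against len) by the equivalent direct test
-- "len(faces) == 5 and all royal faces present" — objective: simpler.


-- ===== PORT A =====
def isRoyal (faces : String) : Bool :=
  let royalFaces : String := "TJQKA"
  let count : Int := royalFaces.toList.foldl
    (fun count char => if PySem.Str.isIn (String.ofList [char]) faces then count + 1 else count - 1) 0
  count == PySem.Str.len faces

-- ===== PORT B =====
def isRoyal_alt (faces : String) : Bool :=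
  PySem.Str.len faces == 5 && "TJQKA".toList.all (fun c => PySem.Str.isIn (String.ofList [c]) faces)

-- ===== PRECONDITION & SPEC =====
def Spec_isRoyal (faces : String) (out : Bool) : Prop := out = isRoyal_alt faces
instance (faces : String) (out : Bool) : Decidable (Spec_isRoyal faces out) := by unfold Spec_isRoyal; infer_instance

-- ===== CLAIM (what is proved, stated in full; the proofs are below) =====
def Claim_equal_isRoyal : Prop := ∀ (faces : String), Dom_isRoyal faces → Spec_isRoyal faces (isRoyal faces)

-- ===== LEMMAS AND PROOFS =====

theorem singleton_infix_iff (c : Char) (l : List Char) : [c] <:+: l ↔ c ∈ l := by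
  constructor
  · intro h; exact List.singleton_sublist.mp h.sublist
  · intro h
    obtain ⟨s, t, rfl⟩ := List.append_of_mem h
    exact ⟨s, t, by simp⟩

-- a one-character "in" test is exactly list membership
theorem isIn_singleton (c : Char) (s : String) :
    PySem.Str.isIn (String.ofList [c]) s = decide (c ∈ s.toList) := by
  rw [Bool.eq_iff_iff, decide_eq_true_iff, PySem.Str.isIn_iff_infix]
  rw [show (String.ofList [c]).toList = [c] by simp]
  exact singleton_infix_iff c s.toList

-- the counter loop in closed form
theorem countFold (p : Char → Bool) (ys : List Char) (i : Int) :
    ys.foldl (fun k c => if p c then k + 1 else k - 1) i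
      = i + 2 * ((ys.filter p).length : Int) - ys.length := by
  induction ys generalizing i with
  | nil => simp
  | cons y ys ih =>
      by_cases h : p y = true <;>
        simp [List.foldl_cons, h, ih] <;> omega

-- ===== VERDICT =====
theorem isRoyal_spec : Claim_equal_isRoyal := by
  intro faces _
  unfold Spec_isRoyal isRoyal isRoyal_alt
  simp only [isIn_singleton, countFold, PySem.Str.len_eq]
  rw [Bool.eq_iff_iff]
  simp only [beq_iff_eq, Bool.and_eq_true, List.all_eq_true, decide_eq_true_eq]
  set n := faces.toList.length with hn
  set F := (("TJQKA".toList).filter (fun c => decide (c ∈ faces.toList))).length with hF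
  have hF5 : F ≤ 5 := by
    have := List.length_filter_le (fun c => decide (c ∈ faces.toList)) ("TJQKA".toList)
    simpa [← hF] using this
  have hFn : F ≤ n := by
    have nod : (("TJQKA".toList).filter (fun c => decide (c ∈ faces.toList))).Nodup :=
      List.Nodup.filter _ (by decide)
    have sub : (("TJQKA".toList).filter (fun c => decide (c ∈ faces.toList))) ⊆ faces.toList := by
      intro x hx
      exact of_decide_eq_true (List.mem_filter.mp hx).2
    exact (nod.subperm sub).length_le
  have hlen5 : (("TJQKA".toList).length : Int) = 5 := by decide
  constructor
  · intro h
    rw [hlen5] at h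
    have hFeq : F = 5 := by omega
    refine ⟨by omega, ?_⟩
    intro c hc
    have hall : ∀ a ∈ "TJQKA".toList, (fun c => decide (c ∈ faces.toList)) a = true := by
      rw [← List.length_filter_eq_length_iff]
      omega
    simpa using hall c hc
  · rintro ⟨h5, hall⟩
    rw [hlen5]
    have : ("TJQKA".toList).filter (fun c => decide (c ∈ faces.toList)) = "TJQKA".toList :=
      List.filter_eq_self.mpr (fun a ha => by simpa using hall a ha)
    have hFeq : F = 5 := by rw [hF, this]; decide
    omega
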